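-- pv_equiv track=rewrite | github.com/pwang724/SpreadsheetBench | evaluation/evaluation.py | generate_cell_names
-- ===== SOURCE A (Python) =====
-- def col_num2name(n):
--     """Convert a column number to an Excel column name"""
--     name = ""
--     while n > 0:
--         n, remainder = divmod(n - 1, 26)
--         name = chr(65 + remainder) + name
--     return name
--
-- def col_name2num(name):
--     """Convert an Excel column name to a column number"""
--     num = 0
--     for c in name:
--         num = num * 26 + (ord(c) - ord("A") + 1)
--     return num
--
-- def parse_cell_range(range_str):
--     """Parse a range string like 'A1:AB12'"""
--     start_cell, end_cell = range_str.split(":")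
--     start_col, start_row = "", ""
--     for char in start_cell:
--         if char.isdigit():
--             start_row += char
--         else:
--             start_col += char
--
--     end_col, end_row = "", ""
--     for char in end_cell:
--         if char.isdigit():
--             end_row += char
--         else:
--             end_col += char
--
--     return (col_name2num(start_col), int(start_row)), (
--         col_name2num(end_col),
--         int(end_row),
--     )
--
-- def generate_cell_names(range_str):
--     """Generate a list of all cell names in the specified range"""
--     if ":" not in range_str:
--         return [range_str]
--     (start_col, start_row), (end_col, end_row) = parse_cell_range(range_str)
--     columns = [col_num2name(i) for i in range(start_col, end_col + 1)]
--     cell_names = [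
--         f"{col}{row}" for col in columns for row in range(start_row, end_row + 1)
--     ]
--     return cell_names
-- ===== SOURCE B (Python) =====
-- def _col_label(n):
--     return "" if n <= 0 else _col_label((n - 1) // 26) + chr(65 + (n - 1) % 26)
--
-- def _col_number(letters):
--     return sum((ord(c) - 64) * 26 ** i for i, c in enumerate(reversed(letters)))
--
-- def generate_cell_names(range_str):
--     if ":" not in range_str:
--         return [range_str]
--     start, end = range_str.split(":")
--     start_row = int("".join(c for c in start if c.isdigit()))
--     end_row = int("".join(c for c in end if c.isdigit()))
--     start_col = _col_number("".join(c for c in start if not c.isdigit()))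
--     end_col = _col_number("".join(c for c in end if not c.isdigit()))
--     n_rows = end_row - start_row + 1
--     n_cols = end_col - start_col + 1
--     if n_rows <= 0 or n_cols <= 0:
--         return []
--     return [
--         _col_label(start_col + k // n_rows) + str(start_row + k % n_rows)
--         for k in range(n_cols * n_rows)
--     ]
-- ===== Notes on version B (the rewrite author's own statement) =====
-- stated objective: alternative
-- what changed: B replaces A's two-stage build (list of column names from numeric conversion, then a nested column x row comprehension) by a single flat loop over one index k, recovering column and row with divmod, a recursive column-label function instead of A's while loop with string prepend, a closed-form power sum instead of A's Horner fold for letters-to-number, and digit/non-digit filters instead of A's accumulator loop.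
import Mathlib
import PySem

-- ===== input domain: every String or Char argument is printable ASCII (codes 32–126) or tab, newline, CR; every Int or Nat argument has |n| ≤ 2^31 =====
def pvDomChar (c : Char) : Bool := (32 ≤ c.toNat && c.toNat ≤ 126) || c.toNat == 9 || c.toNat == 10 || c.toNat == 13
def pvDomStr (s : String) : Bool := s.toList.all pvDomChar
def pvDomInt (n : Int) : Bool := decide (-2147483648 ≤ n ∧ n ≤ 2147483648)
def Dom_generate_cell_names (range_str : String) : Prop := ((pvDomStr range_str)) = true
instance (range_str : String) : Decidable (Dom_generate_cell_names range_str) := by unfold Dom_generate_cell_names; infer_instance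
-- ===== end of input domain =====

-- B re-implements A as one flat loop over a single index with divmod, a recursive label function
-- and a closed-form power sum; equal return value on every input where A returns (alternative, not faster).

-- ===== PORT A =====

-- while n > 0: n, remainder = divmod(n-1, 26); name = chr(65+remainder) + name
def colNum2NameAux (n : Int) (name : List Char) : List Char :=
  if h : 0 < n then
    colNum2NameAux (PySem.Int.floordiv (n - 1) 26)
      (Char.ofNat (65 + (PySem.Int.mod (n - 1) 26)).toNat :: name)
  else name
termination_by n.toNat
decreasing_by
  have h1 : PySem.Int.floordiv (n - 1) 26 = (n - 1) / 26 :=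
    PySem.Int.floordiv_eq_ediv_of_pos (by omega)
  have h2 : (n - 1) / 26 ≤ n - 1 := Int.ediv_le_self _ (by omega)
  have h3 : 0 ≤ (n - 1) / 26 := Int.ediv_nonneg (by omega) (by omega)
  omega

def colNum2Name (n : Int) : List Char := colNum2NameAux n []

-- for c in name: num = num * 26 + (ord(c) - ord('A') + 1)
def colName2Num (name : List Char) : Int :=
  name.foldl (fun num c => num * 26 + ((c.toNat : Int) - 65 + 1)) 0

-- for char in cell: row += char if char.isdigit() else col += char  (accumulators (col, row))
def splitCell (cell : List Char) : List Char × List Char :=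
  cell.foldl
    (fun (p : List Char × List Char) ch =>
      if PySem.Chars.isdigit ch then (p.1, p.2 ++ [ch]) else (p.1 ++ [ch], p.2))
    ([], [])

def generate_cell_names (range_str : String) : List String :=
  if PySem.Str.isIn ":" range_str = false then [range_str]
  else
    match PySem.Str.split? range_str ":" with
    | some [start_cell, end_cell] =>
      let (start_col, start_row) := splitCell start_cell.toList
      let (end_col, end_row) := splitCell end_cell.toList
      match PySem.Int.ofChars? start_row, PySem.Int.ofChars? end_row with
      | some srow, some erow =>
        let scol := colName2Num start_col
        let ecol := colName2Num end_col
        let columns := (PySem.List.pyRange scol (ecol + 1) 1).map colNum2Name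
        columns.flatMap (fun col =>
          (PySem.List.pyRange srow (erow + 1) 1).map
            (fun r => String.ofList (col ++ PySem.Int.toChars r)))
      | _, _ => []  -- int() raises: outside Pre_
    | _ => []       -- split unpack raises (≠ 2 parts): outside Pre_

-- ===== PORT B =====

-- "" if n <= 0 else _col_label((n-1)//26) + chr(65 + (n-1) % 26)
def colLabel (n : Int) : List Char :=
  if _h : 0 < n then
    colLabel (PySem.Int.floordiv (n - 1) 26) ++
      [Char.ofNat (65 + (PySem.Int.mod (n - 1) 26)).toNat]
  else []
termination_by n.toNat
decreasing_by
  have h1 : PySem.Int.floordiv (n - 1) 26 = (n - 1) / 26 :=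
    PySem.Int.floordiv_eq_ediv_of_pos (by omega)
  have h2 : (n - 1) / 26 ≤ n - 1 := Int.ediv_le_self _ (by omega)
  have h3 : 0 ≤ (n - 1) / 26 := Int.ediv_nonneg (by omega) (by omega)
  omega

-- sum((ord(c) - 64) * 26 ** i for i, c in enumerate(reversed(letters)))
def colNumber (letters : List Char) : Int :=
  ((PySem.List.enumerate letters.reverse 0).map
    (fun p => ((p.2.toNat : Int) - 64) * 26 ^ p.1.toNat)).sum

def generate_cell_names_alt (range_str : String) : List String :=
  if PySem.Str.isIn ":" range_str = false then [range_str]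
  else
    let parts := (PySem.Str.split? range_str ":").getD []
    if parts.length = 2 then       -- 'a, b = range_str.split(":")' (ValueError otherwise: outside Pre_)
      let start := parts[0]!
      let «end» := parts[1]!
      (PySem.Int.ofChars? (start.toList.filter PySem.Chars.isdigit)).elim []
        (fun start_row =>
          (PySem.Int.ofChars? («end».toList.filter PySem.Chars.isdigit)).elim []
            (fun end_row =>
              let start_col := colNumber (start.toList.filter (fun c => !PySem.Chars.isdigit c))
              let end_col := colNumber («end».toList.filter (fun c => !PySem.Chars.isdigit c))
              let n_rows := end_row - start_row + 1
              let n_cols := end_col - start_col + 1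
              if n_rows ≤ 0 ∨ n_cols ≤ 0 then []
              else
                (PySem.List.pyRange 0 (n_cols * n_rows) 1).map
                  (fun k => String.ofList
                    (colLabel (start_col + PySem.Int.floordiv k n_rows) ++
                     PySem.Int.toChars (start_row + PySem.Int.mod k n_rows)))))
    else []

-- ===== PRECONDITION & SPEC =====
-- Pre_ excludes exactly the inputs where Python A raises: a string whose ':'-split has more than
-- two parts (tuple-unpack ValueError), or a cell with no digit character (int('') ValueError).
def Pre_generate_cell_names (range_str : String) : Prop :=
  let ps := (PySem.Str.split? range_str ":").getD []
  ps.length = 1 ∨ (ps.length = 2 ∧ ∀ p ∈ ps, p.toList.any PySem.Chars.isdigit = true)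
instance (range_str : String) : Decidable (Pre_generate_cell_names range_str) := by
  unfold Pre_generate_cell_names; infer_instance

def pvWitness_generate_cell_names : String := "A1:B3"

def Spec_generate_cell_names (range_str : String) (out : List String) : Prop := out = generate_cell_names_alt range_str
instance (range_str : String) (out : List String) : Decidable (Spec_generate_cell_names range_str out) := by unfold Spec_generate_cell_names; infer_instance

-- ===== CLAIM (what is proved, stated in full; the proofs are below) =====
def Claim_equal_generate_cell_names : Prop := ∀ (range_str : String), Dom_generate_cell_names range_str → Pre_generate_cell_names range_str → Spec_generate_cell_names range_str (generate_cell_names range_str)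

-- ===== LEMMAS AND PROOFS =====

-- A's accumulator loop is the pair of filters.
theorem splitCell_eq_filter (cell : List Char) :
    splitCell cell =
      (cell.filter (fun c => !PySem.Chars.isdigit c), cell.filter PySem.Chars.isdigit) := by
  have key : ∀ (cs col row : List Char),
      cs.foldl
        (fun (p : List Char × List Char) ch =>
          if PySem.Chars.isdigit ch then (p.1, p.2 ++ [ch]) else (p.1 ++ [ch], p.2))
        (col, row)
      = (col ++ cs.filter (fun c => !PySem.Chars.isdigit c), row ++ cs.filter PySem.Chars.isdigit) := by
    intro cs
    induction cs with
    | nil => intro col row; simp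
    | cons c cs ih =>
      intro col row
      by_cases hd : PySem.Chars.isdigit c
      · simp [List.foldl_cons, hd, ih]
      · simp [List.foldl_cons, hd, ih]
  simpa using key cell [] []

-- A's prepend-accumulator while loop equals B's recursive label with a trailing append.
theorem colNum2NameAux_eq (n : Int) (tail : List Char) :
    colNum2NameAux n tail = colLabel n ++ tail := by
  by_cases h : 0 < n
  · rw [colNum2NameAux, colLabel]
    simp only [h, dif_pos]
    have h1 : PySem.Int.floordiv (n - 1) 26 = (n - 1) / 26 :=
      PySem.Int.floordiv_eq_ediv_of_pos (by omega)
    have h2 : (n - 1) / 26 ≤ n - 1 := Int.ediv_le_self _ (by omega)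
    have h3 : 0 ≤ (n - 1) / 26 := Int.ediv_nonneg (by omega) (by omega)
    rw [colNum2NameAux_eq]
    simp
  · rw [colNum2NameAux, colLabel]
    simp [h]
termination_by n.toNat
decreasing_by
  omega

theorem colNum2Name_eq (n : Int) : colNum2Name n = colLabel n := by
  simpa using colNum2NameAux_eq n []

-- index shift multiplies each power-sum term by 26
theorem pvEnumShift (r : List Char) (s : Nat) :
    ((PySem.List.enumerate r ((s:Int)+1)).map (fun p => ((p.2.toNat : Int) - 64) * 26 ^ p.1.toNat)).sum
  = 26 * ((PySem.List.enumerate r (s:Int)).map (fun p => ((p.2.toNat : Int) - 64) * 26 ^ p.1.toNat)).sum := by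
  induction r generalizing s with
  | nil => simp [PySem.List.enumerate_nil]
  | cons c r ih =>
    rw [PySem.List.enumerate_cons, PySem.List.enumerate_cons]
    simp only [List.map_cons, List.sum_cons]
    have h1 : ((s:Int)+1+1) = (((s+1:Nat)):Int)+1 := by push_cast; ring
    rw [h1, ih (s+1)]
    have h2 : ((s:Int)+1).toNat = s + 1 := by omega
    have h3 : ((s:Int)).toNat = s := by omega
    rw [h2, h3]
    push_cast
    ring

-- A's Horner fold equals B's power sum.
theorem colName2Num_eq (cs : List Char) : colName2Num cs = colNumber cs := by
  induction cs using List.reverseRecOn with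
  | nil => simp [colName2Num, colNumber, PySem.List.enumerate_nil]
  | append_singleton cs c ih =>
    rw [colName2Num, List.foldl_append]
    simp only [List.foldl_cons, List.foldl_nil]
    rw [show (cs.foldl (fun num c => num * 26 + ((c.toNat : Int) - 65 + 1)) 0) = colName2Num cs from rfl, ih]
    rw [colNumber, colNumber, List.reverse_append]
    simp only [List.reverse_singleton, List.singleton_append, PySem.List.enumerate_cons,
      List.map_cons, List.sum_cons]
    rw [show ((0:Int)+1) = ((0:Nat):Int)+1 by norm_num, pvEnumShift]
    norm_num
    ring

-- the flat divmod enumeration equals the nested column-major enumeration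
theorem flat_eq_nested {α : Type} (f : Int → Int → α) (sc sr : Int) (nc nr : Nat)
    (hnr : 0 < nr) :
    (List.range (nc * nr)).map
        (fun (k : Nat) => f (sc + PySem.Int.floordiv (k : Int) (nr : Int))
                    (sr + PySem.Int.mod (k : Int) (nr : Int)))
      = (List.range nc).flatMap
          (fun (i : Nat) => (List.range nr).map (fun (j : Nat) => f (sc + (i : Int)) (sr + (j : Int)))) := by
  induction nc with
  | zero => simp
  | succ nc ih =>
    rw [show (nc+1) * nr = nc * nr + nr by ring, List.range_add, List.map_append,
        List.range_succ, List.flatMap_append, ih]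
    congr 1
    rw [List.flatMap_singleton, List.map_map]
    apply List.map_congr_left
    intro j hj
    simp only [List.mem_range] at hj
    simp only [Function.comp]
    have hd : PySem.Int.floordiv ((nc * nr + j : Nat) : Int) (nr : Int) = ((((nc * nr + j) / nr : Nat)) : Int) :=
      PySem.Int.floordiv_natCast _ _
    have hm : PySem.Int.mod ((nc * nr + j : Nat) : Int) (nr : Int) = ((((nc * nr + j) % nr : Nat)) : Int) :=
      PySem.Int.mod_natCast _ _
    have hdv : (nc * nr + j) / nr = nc := by
      rw [Nat.mul_comm nc nr, Nat.mul_add_div hnr, Nat.div_eq_of_lt hj, Nat.add_zero]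
    have hmv : (nc * nr + j) % nr = j := by
      rw [Nat.mul_comm nc nr, Nat.mul_add_mod, Nat.mod_eq_of_lt hj]
    rw [hd, hm, hdv, hmv]

-- ===== VERDICT (by name: the statement is the Claim_ definition above) =====
theorem generate_cell_names_spec : Claim_equal_generate_cell_names := by
  intro s hdom hpre
  unfold Spec_generate_cell_names generate_cell_names generate_cell_names_alt
  by_cases hc : PySem.Str.isIn ":" s = false
  · rw [if_pos hc, if_pos hc]
  · rw [if_neg hc, if_neg hc]
    cases hsp : PySem.Str.split? s ":" with
    | none => rfl
    | some ps =>
      match ps with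
      | [] => rfl
      | [a] => rfl
      | a :: b :: c :: rest => rfl
      | [a, b] =>
        simp only [splitCell_eq_filter, Option.getD_some]
        rw [show (([a, b] : List String))[0]! = a from rfl,
            show (([a, b] : List String))[1]! = b from rfl,
            if_pos (show ([a, b] : List String).length = 2 from rfl)]
        cases h1 : PySem.Int.ofChars? (a.toList.filter PySem.Chars.isdigit) with
        | none => cases h2 : PySem.Int.ofChars? (b.toList.filter PySem.Chars.isdigit) <;> rfl
        | some sr =>
          cases h2 : PySem.Int.ofChars? (b.toList.filter PySem.Chars.isdigit) with
          | none => rfl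
          | some er =>
            simp only [Option.elim_some, colName2Num_eq]
            set sc := colNumber (a.toList.filter (fun c => !PySem.Chars.isdigit c)) with hsc
            set ec := colNumber (b.toList.filter (fun c => !PySem.Chars.isdigit c)) with hec
            by_cases hr : er - sr + 1 ≤ 0
            · rw [if_pos (Or.inl hr)]
              have : PySem.List.pyRange sr (er + 1) 1 = [] :=
                PySem.List.pyRange_one_eq_nil (by omega)
              simp [this]
            · by_cases hcc : ec - sc + 1 ≤ 0
              · rw [if_pos (Or.inr hcc)]
                have : PySem.List.pyRange sc (ec + 1) 1 = [] :=
                  PySem.List.pyRange_one_eq_nil (by omega)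
                simp [this]
              · rw [if_neg (by omega)]
                set nr := (er + 1 - sr).toNat with hnr
                set nc := (ec + 1 - sc).toNat with hnc
                have hnr0 : 0 < nr := by omega
                have hnc0 : 0 < nc := by omega
                have e2 : er - sr + 1 = (nr : Int) := by omega
                have e2c : ec - sc + 1 = (nc : Int) := by omega
                rw [e2, e2c]
                have e1 : (nc : Int) * (nr : Int) = ((nc * nr : Nat) : Int) := by
                  push_cast; ring
                have e3 : er + 1 = sr + (nr : Int) := by omega
                have e4 : ec + 1 = sc + (nc : Int) := by omega
                rw [e1, e3, e4]
                rw [PySem.List.pyRange_one 0 ((nc * nr : Nat) : Int),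
                    PySem.List.pyRange_one sc (sc + (nc : Int)),
                    PySem.List.pyRange_one sr (sr + (nr : Int))]
                have t1 : ((((nc * nr : Nat) : Int)) - 0).toNat = nc * nr := by omega
                have t2 : ((sc + (nc : Int)) - sc).toNat = nc := by omega
                have t3 : ((sr + (nr : Int)) - sr).toNat = nr := by omega
                rw [t1, t2, t3]
                simp only [List.map_map, List.flatMap_map, Function.comp_def, zero_add,
                  colNum2Name_eq]
                exact (flat_eq_nested
                  (fun c r => String.ofList (colLabel c ++ PySem.Int.toChars r)) sc sr nc nr hnr0).symm
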